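-- pv_equiv track=rewrite | github.com/jeffreyyoo/SICER-2 | sicer/src/coarsegraining.py | coarsegraining
-- ===== SOURCE A (Python) =====
-- def is_list_sorted(List):
--         """
--         Check if sorted in ascending order.
--         input is a list of pure numbers.
--         output: sorted =1 or 0
--         """
--         sorted = 1;
--         for index in range(0, len(List)-1):
--                 if List[index] > List[index + 1]:
--                         sorted = 0;
--         return sorted;
--
-- def graining(List, win, step, score):
-- 	'''
-- 	1 step coarse graining, phase considered:
-- 	List must be sorted!
-- 	List (list) contains (start) coordinates of positive signals;
-- 	win (int) is the window size in list, coarse graining will start from this resolution;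
-- 	step (int) is the number of windows in one graining unit;
-- 	score (int) is the minimum number of positive elements in the graining unit to call the unit positive;
-- 	output is a list of positive unit number in each graining step;
-- 	'''
-- 	result = []
-- 	endlimit = List[-1]
-- 	for p in range(0, step):
-- 		tmp_result = []
-- 		i = List[0] - p * win
-- 		k = 0
-- 		while i <= endlimit and k < len(List):
-- 			j = i + step * win
-- 			h = k
-- 			while h <= (len(List)-1) and List[h] < j:
-- 				h += 1
-- 			n = h - k
-- 			if n >= score:
-- 				tmp_result.append(i)
-- 			k = h
-- 			i = j
-- 		if len(tmp_result) > len(result):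
-- 			result = tmp_result
-- 	return(result)
--
-- def coarsegraining(List, win_min, step, score, genome_length):
-- 	if (is_list_sorted(List) != 1):
-- 		List.sort()
--
-- 	Length_list = []
-- 	Length_list.append(len(List))  #number of eligible windows
-- 	result_list = []
-- 	result_list.append(List)	#list of start positions of eligible windows
-- 	win = win_min
-- 	while len(List) > 0:
-- 		#(xlist, ylist) = start_list_correlation_function(List, win, genome_length)
-- 		#print len(Length_list)-1, len(List)#, correlation_length_fit(xlist, ylist)
-- 		List = graining(List, win, step, score)
-- 		Length_list.append(len(List))
-- 		if len(List) > 0: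
-- 			result_list.append(List)
-- 		win = win * step
-- 	return Length_list, result_list
-- ===== SOURCE B (Python) =====
-- def coarsegraining(List, win_min, step, score, genome_length):
--     # One floor-division bucketing pass over the elements per phase (track the
--     # current window [start, end); one compare per element, one floor division
--     # per occupied window) instead of walking every window of the coordinate
--     # range with an inner rescan.
--     # Like A, this sorts the caller's list in place; return-value equivalence.
--     List.sort()
--     lengths = [len(List)]
--     results = [List]
--     win = win_min
--     cur = List
--     while cur:
--         width = step * win
--         best = []
--         for p in range(step):
--             offset = cur[0] - p * win
--             tmp = []
--             start = None
--             end = None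
--             cnt = 0
--             for x in cur:
--                 if start is not None and x < end:
--                     cnt += 1
--                 else:
--                     if start is not None and cnt >= score:
--                         tmp.append(start)
--                     start = offset + (x - offset) // width * width
--                     end = start + width
--                     cnt = 1
--             if cnt >= score:
--                 tmp.append(start)
--             if len(tmp) > len(best):
--                 best = tmp
--         cur = best
--         lengths.append(len(cur))
--         if cur:
--             results.append(cur)
--         win = win * step
--     return lengths, results
-- ===== Notes on version B (the rewrite author's own statement) =====
-- stated objective: faster
-- what changed: Each graining phase in A walks every window of the coordinate range with an inner rescan of the list; B instead makes one pass over the elements per phase, bucketing them by floor division (x - offset) // (step*win) and flushing runs of equal quotient, so per-phase cost depends on the number of elements, not on the coordinate span.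
import Mathlib
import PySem

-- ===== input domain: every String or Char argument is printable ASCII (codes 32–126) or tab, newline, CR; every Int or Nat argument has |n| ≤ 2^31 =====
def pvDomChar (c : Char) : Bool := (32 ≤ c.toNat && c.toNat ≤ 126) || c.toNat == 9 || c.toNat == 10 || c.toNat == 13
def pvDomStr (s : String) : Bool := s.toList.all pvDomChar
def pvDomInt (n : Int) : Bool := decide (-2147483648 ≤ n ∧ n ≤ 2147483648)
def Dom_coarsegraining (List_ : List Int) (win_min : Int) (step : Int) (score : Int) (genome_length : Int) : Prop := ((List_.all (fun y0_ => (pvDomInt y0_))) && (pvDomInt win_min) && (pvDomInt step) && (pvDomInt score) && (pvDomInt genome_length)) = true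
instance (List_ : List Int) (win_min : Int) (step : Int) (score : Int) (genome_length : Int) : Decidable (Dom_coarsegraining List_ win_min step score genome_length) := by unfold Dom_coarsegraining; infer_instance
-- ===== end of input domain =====

-- B replaces A's per-phase walk over every window of the coordinate range (with an inner
-- rescan) by one floor-division bucketing pass over the elements; equivalence is about the
-- RETURN value (both Pythons sort the caller's list in place).

-- ===== PORT A =====

-- is_list_sorted: fold over range(0, len-1); indices are in range, so getD is exact
def isListSorted (L : List Int) : Int :=
  (PySem.List.pyRange 0 ((L.length : Int) - 1) 1).foldl
    (fun sorted index =>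
      if PySem.List.pyGetD L index 0 > PySem.List.pyGetD L (index + 1) 0 then 0 else sorted) 1

-- inner `while h <= len(List)-1 and List[h] < j: h += 1` (guard gives h < len, so getD is exact)
def countLt (L : List Int) (j : Int) (h : Nat) : Nat :=
  if hc : h < L.length ∧ L.getD h 0 < j then countLt L j (h + 1) else h
termination_by L.length - h
decreasing_by omega

-- outer `while i <= endlimit and k < len(List)` of graining; fuel only makes it total
-- (inside Pre_ the loop runs at most (endlimit - i).toNat + 1 times since i grows by W ≥ 1)
def grainLoop (L : List Int) (endlimit W score : Int) : Nat → Int → Nat → List Int → List Int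
  | 0, _, _, tmp => tmp
  | fuel + 1, i, k, tmp =>
    if i ≤ endlimit ∧ k < L.length then
      let j := i + W
      let h := countLt L j k
      let tmp' := if ((h : Int) - (k : Int)) ≥ score then tmp ++ [i] else tmp
      grainLoop L endlimit W score fuel j h tmp'
    else tmp

-- graining(List, win, step, score); List[-1] / List[0] raise on [] (A only calls it nonempty)
def grainingA (L : List Int) (win step score : Int) : List Int :=
  let endlimit := (PySem.List.pyGet? L (-1)).getD 0
  (PySem.List.pyRange 0 step 1).foldl
    (fun result p =>
      let i0 := PySem.List.pyGetD L 0 0 - p * win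
      let tmp := grainLoop L endlimit (step * win) score ((endlimit - i0).toNat + 1) i0 0 []
      if tmp.length > result.length then tmp else result) []

-- `while len(List) > 0` of coarsegraining; fuel (length + 1) only makes it total
def coarseLoopA (step score : Int) :
    Nat → List Int → Int → List Int → List (List Int) → List Int × List (List Int)
  | 0, _, _, lengths, results => (lengths, results)
  | fuel + 1, cur, win, lengths, results =>
    if 0 < cur.length then
      let nxt := grainingA cur win step score
      coarseLoopA step score fuel nxt (win * step)
        (lengths ++ [(nxt.length : Int)])
        (if 0 < nxt.length then results ++ [nxt] else results)
    else (lengths, results)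

def coarsegraining (List_ : List Int) (win_min : Int) (step : Int) (score : Int) (genome_length : Int) : List Int × List (List Int) :=
  let L := if isListSorted List_ ≠ 1 then PySem.List.sorted List_ (fun x => x) false else List_
  coarseLoopA step score (L.length + 1) L win_min [(L.length : Int)] [L]

-- ===== PORT B =====

-- one element of B's single bucketing pass (state: start, cnt, tmp; Python also
-- carries end, which is always start + width, so the port compares x < start + width)
def bPhaseStep (offset width score : Int) (st : Option Int × Int × List Int) (x : Int) :
    Option Int × Int × List Int :=
  match st with
  | (none, _, tmp) => (some (offset + PySem.Int.floordiv (x - offset) width * width), 1, tmp)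
  | (some start, cnt, tmp) =>
    if x < start + width then (some start, cnt + 1, tmp)
    else (some (offset + PySem.Int.floordiv (x - offset) width * width), 1,
          if cnt ≥ score then tmp ++ [start] else tmp)

-- one phase: bucket cur into windows [start, start + width), flushing each run
-- (the `none` fallthrough of the final flush is unreachable: B only calls this with cur ≠ [])
def bPhase (offset width score : Int) (cur : List Int) : List Int :=
  match cur.foldl (bPhaseStep offset width score) (none, 0, []) with
  | (some start, cnt, tmp) => if cnt ≥ score then tmp ++ [start] else tmp
  | (none, _, tmp) => tmp

def grainingB (cur : List Int) (win step score : Int) : List Int :=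
  let width := step * win
  (PySem.List.pyRange 0 step 1).foldl
    (fun best p =>
      let tmp := bPhase (PySem.List.pyGetD cur 0 0 - p * win) width score cur
      if tmp.length > best.length then tmp else best) []

def coarseLoopB (step score : Int) :
    Nat → List Int → Int → List Int → List (List Int) → List Int × List (List Int)
  | 0, _, _, lengths, results => (lengths, results)
  | fuel + 1, cur, win, lengths, results =>
    if 0 < cur.length then
      let nxt := grainingB cur win step score
      coarseLoopB step score fuel nxt (win * step)
        (lengths ++ [(nxt.length : Int)])
        (if 0 < nxt.length then results ++ [nxt] else results)
    else (lengths, results)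

def coarsegraining_alt (List_ : List Int) (win_min : Int) (step : Int) (score : Int) (genome_length : Int) : List Int × List (List Int) :=
  let L := PySem.List.sorted List_ (fun x => x) false
  coarseLoopB step score (L.length + 1) L win_min [(L.length : Int)] [L]

-- ===== PRECONDITION & SPEC =====

-- Pre_ excludes exactly the inputs on which A never returns: with a nonempty list and
-- step ≥ 1, A's graining loop diverges when win_min ≤ 0 (the window pointer stops
-- advancing past the last coordinate) and when score ≤ 1 (every graining step keeps at
-- least one window per element, so the list never empties and the outer loop runs forever).
def Pre_coarsegraining (List_ : List Int) (win_min : Int) (step : Int) (score : Int) (genome_length : Int) : Prop :=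
  List_ = [] ∨ step ≤ 0 ∨ (1 ≤ win_min ∧ 2 ≤ score)
instance (List_ : List Int) (win_min : Int) (step : Int) (score : Int) (genome_length : Int) : Decidable (Pre_coarsegraining List_ win_min step score genome_length) := by unfold Pre_coarsegraining; infer_instance

def pvWitness_coarsegraining : List Int × Int × Int × Int × Int := ([1, 2, 5, 6], 1, 2, 2, 100)

def Spec_coarsegraining (List_ : List Int) (win_min : Int) (step : Int) (score : Int) (genome_length : Int) (out : List Int × List (List Int)) : Prop := out = coarsegraining_alt List_ win_min step score genome_length
instance (List_ : List Int) (win_min : Int) (step : Int) (score : Int) (genome_length : Int) (out : List Int × List (List Int)) : Decidable (Spec_coarsegraining List_ win_min step score genome_length out) := by unfold Spec_coarsegraining; infer_instance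

-- ===== CLAIM (what is proved, stated in full; the proofs are below) =====
def Claim_equal_coarsegraining : Prop := ∀ (List_ : List Int) (win_min : Int) (step : Int) (score : Int) (genome_length : Int), Dom_coarsegraining List_ win_min step score genome_length → Pre_coarsegraining List_ win_min step score genome_length → Spec_coarsegraining List_ win_min step score genome_length (coarsegraining List_ win_min step score genome_length)

-- ===== LEMMAS AND PROOFS =====

-- ---- A's initial sort branch ----

-- generic: a fold that latches 0 once a witness is seen
theorem foldl_flag (l : List Int) (P : Int → Prop) [DecidablePred P] (init : Int) :
    l.foldl (fun acc x => if P x then 0 else acc) init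
      = if l.any (fun x => decide (P x)) then 0 else init := by
  induction l generalizing init with
  | nil => simp
  | cons x r ih =>
    simp only [List.foldl_cons, List.any_cons]
    by_cases hx : P x
    · simp [hx, ih]
    · simp [hx, ih]

theorem isListSorted_pairwise (L : List Int) (h : isListSorted L = 1) : L.Pairwise (· ≤ ·) := by
  unfold isListSorted at h
  rw [foldl_flag] at h
  by_cases hany : (PySem.List.pyRange 0 ((L.length : Int) - 1) 1).any
      (fun x => decide (PySem.List.pyGetD L x 0 > PySem.List.pyGetD L (x + 1) 0))
  · rw [if_pos hany] at h; exact absurd h (by decide)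
  · apply List.IsChain.pairwise
    rw [List.isChain_iff_getElem]
    intro i hi
    rw [List.any_eq_true] at hany
    push_neg at hany
    have hmem : (i : Int) ∈ PySem.List.pyRange 0 ((L.length : Int) - 1) 1 := by
      rw [PySem.List.mem_pyRange_one]; omega
    have hni := hany _ hmem
    rw [PySem.List.pyGetD_natCast] at hni
    have hcast : (i : Int) + 1 = ((i + 1 : Nat) : Int) := by push_cast; ring
    rw [hcast, PySem.List.pyGetD_natCast] at hni
    rw [List.getD_eq_getElem L 0 (by omega), List.getD_eq_getElem L 0 hi] at hni
    simpa using hni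

theorem le_getLast_of_sorted (l : List Int) (h : l.Pairwise (· ≤ ·)) (hne : l ≠ []) (x : Int)
    (hx : x ∈ l) : x ≤ l.getLast hne := by
  rw [List.getLast_eq_getElem]
  obtain ⟨i, hi, rfl⟩ := List.mem_iff_getElem.mp hx
  rcases Nat.lt_or_ge i (l.length - 1) with hlt | hge
  · exact List.pairwise_iff_getElem.mp h i (l.length - 1) hi (by omega) hlt
  · have : i = l.length - 1 := by omega
    subst this; rfl

theorem sorted_append_singleton (l : List Int) (c : Int) (hl : l.Pairwise (· ≤ ·))
    (hb : ∀ y ∈ l, y ≤ c) : (l ++ [c]).Pairwise (· ≤ ·) := by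
  simp [List.pairwise_append, hl]; exact hb

-- ---- floor-division bucket arithmetic ----

theorem q_eq (offset W m y : Int) (hW : 0 < W) (h1 : offset + m * W ≤ y)
    (h2 : y < offset + (m + 1) * W) : PySem.Int.floordiv (y - offset) W = m := by
  rw [PySem.Int.floordiv_eq_iff_of_pos hW]
  constructor <;> nlinarith

theorem q_ge (offset W m y : Int) (hW : 0 < W) (h1 : offset + (m + 1) * W ≤ y) :
    m + 1 ≤ PySem.Int.floordiv (y - offset) W := by
  rw [PySem.Int.le_floordiv_iff_mul_le hW]; nlinarith

-- ---- characterising A's inner scan ----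

theorem countLt_eq (L : List Int) (j : Int) (h : Nat) :
    countLt L j h = h + ((L.drop h).takeWhile (fun x => decide (x < j))).length := by
  rw [countLt]
  by_cases hc : h < L.length ∧ L.getD h 0 < j
  · rw [dif_pos hc, countLt_eq L j (h + 1)]
    have hd : L[h] :: L.drop (h + 1) = L.drop h := List.getElem_cons_drop hc.1
    have hg : L.getD h 0 = L[h] := List.getD_eq_getElem L 0 hc.1
    rw [← hd, List.takeWhile_cons, if_pos (by rw [hg] at hc; simpa using hc.2)]
    simp; omega
  · rw [dif_neg hc]
    by_cases h1 : h < L.length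
    · push_neg at hc
      have h2 := hc h1
      have hd : L[h] :: L.drop (h + 1) = L.drop h := List.getElem_cons_drop h1
      have hg : L.getD h 0 = L[h] := List.getD_eq_getElem L 0 h1
      rw [← hd, List.takeWhile_cons, if_neg (by rw [hg] at h2; simpa using h2)]
      simp
    · have : L.drop h = [] := List.drop_eq_nil_iff.mpr (by omega)
      simp [this]
termination_by L.length - h
decreasing_by omega

theorem grainLoop_nil (L : List Int) (e W s : Int) (fuel : Nat) (i : Int) (k : Nat)
    (tmp : List Int) (hk : L.length ≤ k) : grainLoop L e W s fuel i k tmp = tmp := by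
  cases fuel with
  | zero => rfl
  | succ f =>
    simp only [grainLoop]
    rw [if_neg (fun hcon => absurd hcon.2 (by omega))]

theorem dropWhile_ge (j : Int) (s : List Int) (hp : s.Pairwise (· ≤ ·)) :
    ∀ z ∈ s.dropWhile (fun a => decide (a < j)), j ≤ z := by
  induction s with
  | nil => simp
  | cons x r ih =>
    intro z hz
    rw [List.dropWhile_cons] at hz
    by_cases hx : x < j
    · simp only [decide_eq_true_eq] at hz
      rw [if_pos (by simpa using hx)] at hz
      exact ih hp.of_cons z hz
    · rw [if_neg (by simpa using hx)] at hz
      rcases List.mem_cons.mp hz with rfl | hz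
      · omega
      · have := List.rel_of_pairwise_cons hp hz; omega

-- ---- B's bucketing pass: helpers ----

def bFinish (offset width score : Int) (st : Option Int × Int × List Int) : List Int :=
  match st with
  | (some start, cnt, tmp) => if cnt ≥ score then tmp ++ [start] else tmp
  | (none, _, tmp) => tmp

theorem bPhase_eq_finish (offset width score : Int) (cur : List Int) :
    bPhase offset width score cur
      = bFinish offset width score (cur.foldl (bPhaseStep offset width score) (none, 0, [])) := by
  unfold bPhase bFinish
  rcases cur.foldl (bPhaseStep offset width score) (none, 0, []) with ⟨q, c, t⟩
  cases q <;> rfl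

theorem bRun_run (offset W score : Int) (t : List Int) :
    ∀ (st c : Int) (tmp : List Int), (∀ x ∈ t, x < st + W) →
      t.foldl (bPhaseStep offset W score) (some st, c, tmp) = (some st, c + t.length, tmp) := by
  induction t with
  | nil => intro st c tmp _; simp
  | cons x r ih =>
    intro st c tmp hq
    have hx := hq x (by simp)
    simp only [List.foldl_cons]
    have hstep : bPhaseStep offset W score (some st, c, tmp) x = (some st, c + 1, tmp) := by
      simp [bPhaseStep, hx]
    rw [hstep, ih st (c + 1) tmp (fun z hz => hq z (by simp [hz]))]
    have : c + 1 + (r.length : Int) = c + ((r.length + 1 : Nat) : Int) := by push_cast; ring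
    simp [this]

theorem bRun_boundary (offset W score : Int) (x : Int) (r : List Int) (st c : Int)
    (tmp : List Int) (hge : ¬ x < st + W) :
    (x :: r).foldl (bPhaseStep offset W score) (some st, c, tmp)
      = (x :: r).foldl (bPhaseStep offset W score)
          (none, 0, if c ≥ score then tmp ++ [st] else tmp) := by
  simp only [List.foldl_cons]
  congr 1
  simp [bPhaseStep, hge]

-- ---- the core lemma: A's window walk equals B's bucketing pass ----

theorem main_eq (L : List Int) (endlimit W score offset : Int)
    (hW : 1 ≤ W) (hsc : 1 ≤ score) (hsort : L.Pairwise (· ≤ ·))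
    (hend : ∀ x ∈ L, x ≤ endlimit) :
    ∀ (fuel : Nat) (i m : Int) (k : Nat) (tmp : List Int),
      i = offset + m * W →
      (∀ x ∈ L.drop k, i ≤ x) →
      (endlimit - i).toNat + 1 ≤ fuel →
      grainLoop L endlimit W score fuel i k tmp
        = bFinish offset W score ((L.drop k).foldl (bPhaseStep offset W score) (none, 0, tmp)) := by
  intro fuel
  induction fuel with
  | zero => intro i m k tmp _ _ hf; omega
  | succ f ih =>
    intro i m k tmp hi hlow hf
    rcases hs : L.drop k with _ | ⟨x, s'⟩
    · rw [grainLoop_nil L endlimit W score (f + 1) i k tmp (List.drop_eq_nil_iff.mp hs)]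
      simp [bFinish]
    · rw [← hs]
      have hklen : k < L.length := by
        by_contra hk
        push_neg at hk
        rw [List.drop_eq_nil_iff.mpr hk] at hs
        simp at hs
      have hsortk : (L.drop k).Pairwise (· ≤ ·) := hsort.drop
      have hxmem : x ∈ L.drop k := by rw [hs]; simp
      have hxlow : i ≤ x := hlow x hxmem
      have hxend : x ≤ endlimit := hend x (List.mem_of_mem_drop hxmem)
      simp only [grainLoop]
      rw [if_pos ⟨le_trans hxlow hxend, hklen⟩, countLt_eq]
      set j := i + W with hj
      set t := (L.drop k).takeWhile (fun y => decide (y < j)) with ht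
      have hsplit : t ++ (L.drop k).dropWhile (fun y => decide (y < j)) = L.drop k :=
        List.takeWhile_append_dropWhile
      have hdroph : L.drop (k + t.length) = (L.drop k).dropWhile (fun y => decide (y < j)) := by
        rw [← List.drop_drop]
        conv_lhs => rw [← hsplit]
        exact List.drop_left
      have hcast : ((k + t.length : Nat) : Int) - (k : Nat) = (t.length : Int) := by
        push_cast; ring
      by_cases hx : x < j
      · -- nonempty run: the window containing x is [i, j)
        have hqx : PySem.Int.floordiv (x - offset) W = m := by
          refine q_eq offset W m x (by omega) (by rw [hi] at hxlow; exact hxlow) ?_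
          have hx' := hx
          rw [hj, hi] at hx'
          nlinarith [hx']
        have htcons : t = x :: s'.takeWhile (fun y => decide (y < j)) := by
          rw [ht, hs, List.takeWhile_cons, if_pos (by simpa using hx)]
        -- B side: consume the run of the window starting at i
        have hBrun : (L.drop k).foldl (bPhaseStep offset W score) (none, 0, tmp)
            = ((L.drop k).dropWhile (fun y => decide (y < j))).foldl
                (bPhaseStep offset W score) (some i, (t.length : Int), tmp) := by
          conv_lhs => rw [← hsplit, List.foldl_append]
          have hlen : ((t.length : Int))
              = 1 + ((s'.takeWhile (fun y => decide (y < j))).length : Int) := by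
            rw [htcons]; simp only [List.length_cons]; push_cast; ring
          congr 1
          rw [hlen]
          conv_lhs => rw [htcons]
          simp only [List.foldl_cons]
          have hstep0 : bPhaseStep offset W score (none, 0, tmp) x = (some i, 1, tmp) := by
            simp [bPhaseStep, hqx, ← hi]
          rw [hstep0]
          refine bRun_run offset W score _ i 1 tmp ?_
          intro z hz
          have hzt : z ∈ t := by rw [htcons]; exact List.mem_cons_of_mem x hz
          have := List.mem_takeWhile_imp hzt
          simp only [decide_eq_true_eq] at this
          rw [← hj]; exact this
        rw [hBrun, hcast]
        rcases hrest : (L.drop k).dropWhile (fun y => decide (y < j)) with _ | ⟨y, r'⟩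
        · -- list exhausted inside this window
          have hknil : L.length ≤ k + t.length := List.drop_eq_nil_iff.mp (hdroph.trans hrest)
          rw [grainLoop_nil L endlimit W score f j (k + t.length) _ hknil]
          simp only [List.foldl_nil, bFinish]
        · -- boundary: the next element lies beyond this window
          have hymem : y ∈ (L.drop k).dropWhile (fun a => decide (a < j)) := by rw [hrest]; simp
          have hyj : j ≤ y := dropWhile_ge j (L.drop k) hsortk y hymem
          have hyend : y ≤ endlimit :=
            hend y (List.mem_of_mem_drop (hdroph ▸ (hrest ▸ (by simp : y ∈ y :: r'))))
          have hyge : ¬ y < i + W := by rw [← hj]; omega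
          rw [bRun_boundary offset W score y r' i (t.length : Int) tmp hyge,
            ← hrest, ← hdroph]
          refine ih j (m + 1) (k + t.length) _ (by rw [hj, hi]; ring) ?_ ?_
          · intro z hz
            exact dropWhile_ge j (L.drop k) hsortk z (hdroph ▸ hz)
          · have hyj' := hyj
            rw [hj] at hyj'
            omega
      · -- empty window: i advances, nothing is consumed
        have htnil : t = [] := by
          rw [ht, hs, List.takeWhile_cons, if_neg (by simpa using hx)]
        rw [htnil]
        simp only [List.length_nil, Nat.add_zero]
        have hcond : ¬ (((k : Nat) : Int) - ((k : Nat) : Int) ≥ score) := by omega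
        rw [if_neg hcond]
        have hjx : i + W ≤ x := by rw [hj] at hx; omega
        refine ih j (m + 1) k tmp (by rw [hj, hi]; ring) ?_ ?_
        · intro z hz
          rcases List.mem_cons.mp (hs ▸ hz) with rfl | hz'
          · rw [hj]; exact hjx
          · have hxz : x ≤ z := List.rel_of_pairwise_cons (hs ▸ hsortk) hz'
            rw [hj]; omega
        · rw [hj]; omega

-- ---- one graining step: A = B ----

theorem graining_eq (L : List Int) (win step score : Int) (hne : L ≠ [])
    (hsort : L.Pairwise (· ≤ ·)) (hws : 1 ≤ step → 1 ≤ win ∧ 1 ≤ score) :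
    grainingA L win step score = grainingB L win step score := by
  by_cases hstep : 1 ≤ step
  case neg =>
    have hnil : PySem.List.pyRange 0 step 1 = [] := PySem.List.pyRange_one_eq_nil (by omega)
    simp [grainingA, grainingB, hnil]
  case pos =>
    obtain ⟨hwin, hsc⟩ := hws hstep
    obtain ⟨x0, r, rfl⟩ := List.exists_cons_of_ne_nil hne
    simp only [grainingA, grainingB]
    apply PySem.List.foldl_congr_mem
    intro best p hp
    rw [PySem.List.mem_pyRange_one] at hp
    have h00 : PySem.List.pyGetD (x0 :: r) 0 0 = x0 := PySem.List.pyGetD_zero_cons x0 r 0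
    rw [h00]
    have hW : 1 ≤ step * win := by nlinarith
    have hlast : ((PySem.List.pyGet? (x0 :: r) (-1)).getD 0) = (x0 :: r).getLast (by simp) := by
      simp [PySem.List.pyGet?_neg_one, List.getLast?_eq_some_getLast (List.cons_ne_nil x0 r)]
    have hend : ∀ x ∈ x0 :: r, x ≤ (PySem.List.pyGet? (x0 :: r) (-1)).getD 0 := by
      intro x hx
      rw [hlast]
      exact le_getLast_of_sorted _ hsort _ x hx
    have hmain := main_eq (x0 :: r) ((PySem.List.pyGet? (x0 :: r) (-1)).getD 0) (step * win) score
      (x0 - p * win) hW hsc hsort hend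
      (((PySem.List.pyGet? (x0 :: r) (-1)).getD 0 - (x0 - p * win)).toNat + 1)
      (x0 - p * win) 0 0 [] (by ring)
      (by
        intro x hx
        simp only [List.drop_zero] at hx
        have hp0 : 0 ≤ p * win := mul_nonneg hp.1 (by omega)
        rcases List.mem_cons.mp hx with rfl | hx'
        · omega
        · have := List.rel_of_pairwise_cons hsort hx'; omega)
      (le_refl _)
    rw [List.drop_zero] at hmain
    rw [bPhase_eq_finish, ← hmain]

-- ---- B's graining output is sorted ----

theorem bsort_some (offset W score : Int) (hW : 0 < W) (s : List Int) :
    ∀ (m c : Int) (tmp : List Int), s.Pairwise (· ≤ ·) →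
      tmp.Pairwise (· ≤ ·) → (∀ y ∈ tmp, y ≤ offset + m * W) →
      (bFinish offset W score
        (s.foldl (bPhaseStep offset W score) (some (offset + m * W), c, tmp))).Pairwise (· ≤ ·) := by
  induction s with
  | nil =>
    intro m c tmp _ htmp hb
    simp only [List.foldl_nil, bFinish]
    split
    · exact sorted_append_singleton tmp _ htmp hb
    · exact htmp
  | cons x r ih =>
    intro m c tmp hp htmp hb
    simp only [List.foldl_cons]
    by_cases hlt : x < offset + m * W + W
    · have hstep : bPhaseStep offset W score (some (offset + m * W), c, tmp) x
          = (some (offset + m * W), c + 1, tmp) := by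
        simp [bPhaseStep, hlt]
      rw [hstep]
      exact ih m (c + 1) tmp hp.of_cons htmp hb
    · have hstep : bPhaseStep offset W score (some (offset + m * W), c, tmp) x
          = (some (offset + PySem.Int.floordiv (x - offset) W * W), 1,
             if c ≥ score then tmp ++ [offset + m * W] else tmp) := by
        simp [bPhaseStep, hlt]
      rw [hstep]
      have hm' : m + 1 ≤ PySem.Int.floordiv (x - offset) W := by
        refine q_ge offset W m x hW ?_
        nlinarith [hlt]
      have hmul : offset + m * W ≤ offset + PySem.Int.floordiv (x - offset) W * W := by
        nlinarith
      refine ih (PySem.Int.floordiv (x - offset) W) 1 _ hp.of_cons ?_ ?_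
      · split
        · exact sorted_append_singleton tmp _ htmp hb
        · exact htmp
      · intro y hy
        split at hy
        · rcases List.mem_append.mp hy with hy' | hy'
          · exact le_trans (hb y hy') hmul
          · simp at hy'; omega
        · exact le_trans (hb y hy) hmul

theorem grainingB_sorted (cur : List Int) (win step score : Int) (hne : cur ≠ [])
    (hsort : cur.Pairwise (· ≤ ·)) (hws : 1 ≤ step → 1 ≤ win) :
    (grainingB cur win step score).Pairwise (· ≤ ·) := by
  simp only [grainingB]
  refine List.foldlRecOn (motive := fun r => List.Pairwise (fun x1 x2 : Int => x1 ≤ x2) r) _ _ ?_ ?_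
  · exact List.Pairwise.nil
  · intro best hbest p hp
    rw [PySem.List.mem_pyRange_one] at hp
    have hW : 0 < step * win := by
      have := hws (by omega)
      nlinarith
    split
    · -- the candidate bPhase result
      obtain ⟨x0, r, rfl⟩ := List.exists_cons_of_ne_nil hne
      rw [bPhase_eq_finish]
      simp only [List.foldl_cons]
      have hstep0 : bPhaseStep (PySem.List.pyGetD (x0 :: r) 0 0 - p * win) (step * win) score
          (none, 0, []) x0
          = (some ((PySem.List.pyGetD (x0 :: r) 0 0 - p * win)
              + PySem.Int.floordiv (x0 - (PySem.List.pyGetD (x0 :: r) 0 0 - p * win)) (step * win)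
                * (step * win)), 1, []) := by
        simp [bPhaseStep]
      rw [hstep0]
      apply bsort_some _ _ _ hW
      · exact hsort.of_cons
      · exact List.Pairwise.nil
      · simp
    · exact hbest

-- ---- the outer loop ----

theorem outer_eq (step score : Int) (fuel : Nat) :
    ∀ (cur : List Int) (win : Int) (lengths : List Int) (results : List (List Int)),
      cur.Pairwise (· ≤ ·) → (1 ≤ step → 1 ≤ win ∧ 1 ≤ score) →
      coarseLoopA step score fuel cur win lengths results
        = coarseLoopB step score fuel cur win lengths results := by
  induction fuel with
  | zero => intros; rfl
  | succ f ih =>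
    intro cur win lengths results hsort hws
    by_cases hc : 0 < cur.length
    · have hne : cur ≠ [] := by
        intro hnil; rw [hnil] at hc; simp at hc
      have hgr : grainingA cur win step score = grainingB cur win step score :=
        graining_eq cur win step score hne hsort hws
      simp only [coarseLoopA, coarseLoopB, if_pos hc]
      rw [hgr]
      apply ih
      · exact grainingB_sorted cur win step score hne hsort (fun h => (hws h).1)
      · intro hstep
        obtain ⟨hw, hsc⟩ := hws hstep
        exact ⟨by nlinarith, hsc⟩
    · simp only [coarseLoopA, coarseLoopB, if_neg hc]

-- ===== VERDICT (by name: the statement is the Claim_ definition above) =====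
theorem coarsegraining_spec : Claim_equal_coarsegraining := by
  intro L win_min step score genome_length _hd hpre
  unfold Spec_coarsegraining coarsegraining coarsegraining_alt
  have hLeq : (if isListSorted L ≠ 1 then PySem.List.sorted L (fun x => x) false else L)
      = PySem.List.sorted L (fun x => x) false := by
    by_cases h : isListSorted L = 1
    · rw [if_neg (by simp [h])]
      exact (PySem.List.sorted_eq_self_of_pairwise L (fun x => x)
        (by simpa using isListSorted_pairwise L h)).symm
    · rw [if_pos h]
  rw [hLeq]
  have hsort : (PySem.List.sorted L (fun x => x) false).Pairwise (· ≤ ·) := by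
    simpa using PySem.List.sorted_pairwise L (fun x => x)
  rcases hpre with hnil | hstep | ⟨hw, hsc⟩
  · subst hnil
    rfl
  · exact outer_eq step score _ _ _ _ _ hsort (fun h => absurd h (by omega))
  · exact outer_eq step score _ _ _ _ _ hsort (fun _ => ⟨hw, by omega⟩)
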